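-- pv_equiv track=rewrite | github.com/kirichenko87/Algo2 | reverse_even_elements.py | reverse_even_elements
-- ===== SOURCE A (Python) =====
-- def even(num: int):
--     result = True
--
--     if num % 2 != 0:
--         result = False
--
--     return result
--
-- def reverse_even_elements(arr: list):
--     lenght = len(arr)
--     iter = lenght - 1
--
--     for i in range(0, lenght, 1):
--
--         if iter <= i:
--             continue
--
--         if even(arr[i]):
--
--             while not even(arr[iter]):
--                 iter -= 1
--
--             tmp = arr[i]
--             arr[i] = arr[iter]
--             arr[iter] = tmp
--             iter -= 1
--
--     return arr
-- ===== SOURCE B (Python) =====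
-- def reverse_even_elements(arr: list):
--     # One comprehension pass: feed reversed even values back into the even slots.
--     rev = reversed([x for x in arr if x % 2 == 0])
--     arr[:] = [next(rev) if x % 2 == 0 else x for x in arr]
--     return arr
-- ===== Notes on version B (the rewrite author's own statement) =====
-- stated objective: simpler
-- what changed: A's interleaved inward swap scan with a separate descending while-pointer is replaced by: collect the even values, reverse them, and write them back into the even positions in one comprehension (same in-place mutation of arr).
import Mathlib
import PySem

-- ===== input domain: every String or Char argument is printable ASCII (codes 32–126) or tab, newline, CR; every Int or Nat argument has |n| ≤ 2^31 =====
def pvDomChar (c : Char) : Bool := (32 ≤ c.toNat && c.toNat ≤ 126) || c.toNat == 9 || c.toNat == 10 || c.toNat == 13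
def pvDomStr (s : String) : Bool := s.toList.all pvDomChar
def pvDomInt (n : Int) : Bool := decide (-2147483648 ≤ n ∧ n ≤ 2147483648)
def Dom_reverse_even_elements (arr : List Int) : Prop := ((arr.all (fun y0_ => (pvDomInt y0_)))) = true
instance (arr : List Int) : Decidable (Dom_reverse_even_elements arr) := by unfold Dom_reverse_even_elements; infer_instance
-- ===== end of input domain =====

-- B replaces A's interleaved inward swap scan (with its descending while-pointer) by one
-- comprehension pass that feeds the reversed even values back into the even slots (objective:
-- simpler). Both A and B mutate arr in place in Python and return it; the equivalence proved
-- here is about the returned value.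

-- ===== PORT A =====
def pvEven (num : Int) : Bool :=
  let result := true
  if PySem.Int.mod num 2 ≠ 0 then false else result

def pvFindIter (arr : List Int) (fuel : Nat) (iter : Int) : Int :=
  match fuel with
  | 0 => iter
  | f+1 =>
    if pvEven (PySem.List.pyGetD arr iter 0) = false then pvFindIter arr f (iter - 1)
    else iter

def pvLoopBody (st : List Int × Int) (i : Int) : List Int × Int :=
  let cur := st.1
  let iter := st.2
  if iter ≤ i then st
  else if pvEven (PySem.List.pyGetD cur i 0) = true then
    let iter := pvFindIter cur cur.length iter
    let tmp := PySem.List.pyGetD cur i 0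
    let cur := PySem.List.pySetD cur i (PySem.List.pyGetD cur iter 0)
    let cur := PySem.List.pySetD cur iter tmp
    (cur, iter - 1)
  else st

def reverse_even_elements (arr : List Int) : List Int :=
  let lenght : Int := arr.length
  ((PySem.List.pyRange 0 lenght 1).foldl pvLoopBody (arr, lenght - 1)).1

-- ===== PORT B =====
def pvFill : List Int → List Int → List Int
  | [], _ => []
  | x :: xs, es =>
    if PySem.Int.mod x 2 == 0 then
      match es with
      | e :: es' => e :: pvFill xs es'
      | [] => x :: pvFill xs []
    else x :: pvFill xs es

def reverse_even_elements_alt (arr : List Int) : List Int :=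
  pvFill arr ((arr.filter (fun x => PySem.Int.mod x 2 == 0)).reverse)

-- ===== PRECONDITION & SPEC =====
def Spec_reverse_even_elements (arr : List Int) (out : List Int) : Prop := out = reverse_even_elements_alt arr
instance (arr : List Int) (out : List Int) : Decidable (Spec_reverse_even_elements arr out) := by unfold Spec_reverse_even_elements; infer_instance

-- ===== CLAIM =====
def Claim_equal_reverse_even_elements : Prop := ∀ (arr : List Int), Dom_reverse_even_elements arr → Spec_reverse_even_elements arr (reverse_even_elements arr)

-- ===== LEMMAS AND PROOFS =====

def pvP (arr : List Int) (j : Nat) : Bool := pvEven (arr.getD j 0)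
def pvIdxs (arr : List Int) : List Nat := (List.range arr.length).filter (pvP arr)
def pvM (arr : List Int) : Nat := (pvIdxs arr).length
def pvRank (arr : List Int) (j : Nat) : Nat := ((List.range j).filter (pvP arr)).length
def pvIx (arr : List Int) (r : Nat) : Nat := (pvIdxs arr).getD r 0
def pvCross (arr : List Int) (r : Nat) : Bool :=
  if r = 0 then decide (arr.length ≤ pvIx arr 0 + 1)
  else decide (pvIx arr (pvM arr - r) ≤ pvIx arr r + 1)
def pvT (arr : List Int) : Nat :=
  Nat.find (p := fun r => r = pvM arr ∨ pvCross arr r = true) ⟨pvM arr, Or.inl rfl⟩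
def pvIterF (arr : List Int) (t : Nat) : Int :=
  if t = 0 then (arr.length : Int) - 1 else (pvIx arr (pvM arr - t) : Int) - 1
def pvExp (arr : List Int) (t : Nat) (j : Nat) : Int :=
  if pvP arr j = true ∧ (pvRank arr j < t ∨ pvM arr - t ≤ pvRank arr j) then
    arr.getD (pvIx arr (pvM arr - 1 - pvRank arr j)) 0
  else arr.getD j 0
def pvInv (arr : List Int) (i : Nat) (st : List Int × Int) : Prop :=
  st.1.length = arr.length ∧
  (∀ j, j < arr.length → st.1.getD j 0 = pvExp arr (min (pvRank arr i) (pvT arr)) j) ∧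
  st.2 = pvIterF arr (min (pvRank arr i) (pvT arr))

lemma pvEven_eq_beq (x : Int) : pvEven x = (PySem.Int.mod x 2 == 0) := by
  rw [pvEven]
  by_cases h : PySem.Int.mod x 2 = 0
  · rw [if_neg (by simpa using h)]
    exact (beq_iff_eq.mpr h).symm
  · rw [if_pos h]
    exact (beq_eq_false_iff_ne.mpr h).symm

lemma pvIdxs_pairwise (arr : List Int) : (pvIdxs arr).Pairwise (· < ·) :=
  List.Pairwise.filter _ List.pairwise_lt_range

lemma pvIdxs_nodup (arr : List Int) : (pvIdxs arr).Nodup :=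
  (pvIdxs_pairwise arr).imp (fun h => Nat.ne_of_lt h)

lemma pvIdxs_getElem_mem {arr : List Int} {r : Nat} (h : r < pvM arr) :
    pvIx arr r < arr.length ∧ pvP arr (pvIx arr r) = true := by
  have hmem : pvIx arr r ∈ pvIdxs arr := by
    rw [pvIx, List.getD_eq_getElem _ 0 h]
    exact List.getElem_mem _
  simp only [pvIdxs, List.mem_filter, List.mem_range] at hmem
  exact hmem

lemma pvIx_lt_length {arr : List Int} {r : Nat} (h : r < pvM arr) : pvIx arr r < arr.length :=
  (pvIdxs_getElem_mem h).1

lemma pvP_pvIx {arr : List Int} {r : Nat} (h : r < pvM arr) : pvP arr (pvIx arr r) = true :=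
  (pvIdxs_getElem_mem h).2

lemma pvIx_lt_pvIx {arr : List Int} {a b : Nat} (hb : b < pvM arr) (hab : a < b) :
    pvIx arr a < pvIx arr b := by
  have ha : a < pvM arr := by omega
  have := List.pairwise_iff_getElem.mp (pvIdxs_pairwise arr) a b ha hb hab
  rwa [pvIx, pvIx, List.getD_eq_getElem _ 0 ha, List.getD_eq_getElem _ 0 hb]

lemma pvIx_mono {arr : List Int} {a b : Nat} (hb : b < pvM arr) (hab : a ≤ b) :
    pvIx arr a ≤ pvIx arr b := by
  rcases Nat.lt_or_ge a b with h | h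
  · exact Nat.le_of_lt (pvIx_lt_pvIx hb h)
  · have : a = b := by omega
    simp [this]

lemma lt_of_pvIx_lt {arr : List Int} {a b : Nat} (ha : a < pvM arr) (_hb : b < pvM arr)
    (h : pvIx arr a < pvIx arr b) : a < b := by
  by_contra hc
  have := pvIx_mono ha (show b ≤ a by omega)
  omega

lemma pvIx_inj {arr : List Int} {a b : Nat} (ha : a < pvM arr) (hb : b < pvM arr)
    (h : pvIx arr a = pvIx arr b) : a = b := by
  rw [pvIx, pvIx, List.getD_eq_getElem _ 0 ha, List.getD_eq_getElem _ 0 hb] at h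
  exact (List.Nodup.getElem_inj_iff (pvIdxs_nodup arr)).mp h

lemma pvRank_succ (arr : List Int) (j : Nat) :
    pvRank arr (j+1) = pvRank arr j + if pvP arr j then 1 else 0 := by
  simp [pvRank, List.range_succ, List.filter_append]
  by_cases h : pvP arr j <;> simp [h]

lemma pvRank_mono {arr : List Int} {j k : Nat} (h : j ≤ k) : pvRank arr j ≤ pvRank arr k := by
  simpa [pvRank, ← List.countP_eq_length_filter] using
    List.Sublist.countP_le (p := pvP arr) (List.range_sublist.mpr h)

lemma pvRank_length (arr : List Int) : pvRank arr arr.length = pvM arr := rfl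

lemma pvRank_lt_m {arr : List Int} {j : Nat} (hj : j < arr.length) (hp : pvP arr j = true) :
    pvRank arr j < pvM arr := by
  have h1 := pvRank_succ arr j
  have h2 : pvRank arr (j+1) ≤ pvRank arr arr.length := pvRank_mono (by omega)
  rw [pvRank_length] at h2
  simp [hp] at h1
  omega

lemma pvFilterLt (arr : List Int) {j : Nat} (hj : j ≤ arr.length) :
    (pvIdxs arr).filter (fun a => decide (a < j)) = (List.range j).filter (pvP arr) := by
  obtain ⟨d, hd⟩ : ∃ d, arr.length = j + d := ⟨arr.length - j, by omega⟩
  rw [pvIdxs, List.filter_filter, hd, List.range_add, List.filter_append]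
  have h1 : (List.range j).filter (fun a => decide (a < j) && pvP arr a)
      = (List.range j).filter (pvP arr) := by
    apply List.filter_congr
    intro a hma
    rw [List.mem_range] at hma
    simp [hma]
  have h2 : ((List.range d).map (j + ·)).filter (fun a => decide (a < j) && pvP arr a) = [] := by
    rw [List.filter_map]
    have hfalse : (List.range d).filter (fun a => decide (j + a < j) && pvP arr (j + a))
        = (List.range d).filter (fun _ => false) := by
      apply List.filter_congr
      intro a _
      simp
    simp only [Function.comp_def, hfalse, List.filter_false, List.map_nil]
  rw [h1, h2, List.append_nil]

lemma sorted_getD_of_mem : ∀ (l : List Nat), l.Pairwise (· < ·) → ∀ j ∈ l,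
    l.getD ((l.filter (fun a => decide (a < j))).length) 0 = j := by
  intro l
  induction l with
  | nil => intro _ j hj; simp at hj
  | cons x xs ih =>
    intro hpw j hj
    rw [List.pairwise_cons] at hpw
    rcases List.mem_cons.mp hj with rfl | hjx
    · have hnil : (j :: xs).filter (fun a => decide (a < j)) = [] := by
        apply List.filter_eq_nil_iff.mpr
        intro a hma
        rcases List.mem_cons.mp hma with rfl | hax
        · simp
        · have := hpw.1 a hax
          simp; omega
      rw [hnil]
      rfl
    · have hxj : x < j := hpw.1 j hjx
      have hcons : (x :: xs).filter (fun a => decide (a < j))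
          = x :: xs.filter (fun a => decide (a < j)) := by
        rw [List.filter_cons]
        simp [hxj]
      rw [hcons, List.length_cons, List.getD_cons_succ]
      exact ih hpw.2 j hjx

lemma pvIx_rank {arr : List Int} {j : Nat} (hj : j < arr.length) (hp : pvP arr j = true) :
    pvIx arr (pvRank arr j) = j := by
  have hmem : j ∈ pvIdxs arr := by
    simp [pvIdxs, List.mem_filter, List.mem_range]; exact ⟨hj, hp⟩
  have := sorted_getD_of_mem (pvIdxs arr) (pvIdxs_pairwise arr) j hmem
  rwa [pvFilterLt arr (by omega)] at this

lemma pvRank_pvIx {arr : List Int} {r : Nat} (h : r < pvM arr) :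
    pvRank arr (pvIx arr r) = r := by
  have h1 := pvIx_rank (pvIx_lt_length h) (pvP_pvIx h)
  have h2 : pvRank arr (pvIx arr r) < pvM arr := pvRank_lt_m (pvIx_lt_length h) (pvP_pvIx h)
  exact pvIx_inj h2 h h1

lemma pvNotP_gt_last {arr : List Int} {k : Nat} (hk : k < arr.length) (hm : 0 < pvM arr)
    (h : pvIx arr (pvM arr - 1) < k) : pvP arr k = false := by
  by_contra hc
  have hp : pvP arr k = true := by simpa using hc
  have h1 := pvIx_rank hk hp
  have h2 : pvRank arr k < pvM arr := pvRank_lt_m hk hp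
  have := pvIx_mono (arr := arr) (a := pvRank arr k) (b := pvM arr - 1) (by omega) (by omega)
  omega

lemma pvNotP_between {arr : List Int} {σ k : Nat} (hσ : σ + 1 < pvM arr)
    (h1 : pvIx arr σ < k) (h2 : k < pvIx arr (σ+1)) : pvP arr k = false := by
  by_contra hc
  have hp : pvP arr k = true := by simpa using hc
  have hk : k < arr.length := by
    have := pvIx_lt_length hσ; omega
  have he := pvIx_rank hk hp
  have hr : pvRank arr k < pvM arr := pvRank_lt_m hk hp
  have ha : σ < pvRank arr k := lt_of_pvIx_lt (by omega) hr (by omega)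
  have hb2 : pvRank arr k < σ + 1 := lt_of_pvIx_lt hr hσ (by omega)
  omega

lemma getD_set (l : List Int) (a j : Nat) (v : Int) (hj : j < l.length) :
    (l.set a v).getD j 0 = if a = j then v else l.getD j 0 := by
  rw [List.getD_eq_getElem _ 0 (by simpa using hj), List.getD_eq_getElem _ 0 hj,
    List.getElem_set]

lemma pvCross_pvT {arr : List Int} (h : pvT arr < pvM arr) : pvCross arr (pvT arr) = true := by
  have hs : pvT arr = pvM arr ∨ pvCross arr (pvT arr) = true :=
    Nat.find_spec (p := fun r => r = pvM arr ∨ pvCross arr r = true) ⟨pvM arr, Or.inl rfl⟩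
  rcases hs with h1 | h1
  · omega
  · exact h1

lemma pvCross_false_of_lt {arr : List Int} {r : Nat} (h : r < pvT arr) :
    pvCross arr r = false ∧ r ≠ pvM arr := by
  have hm : ¬(r = pvM arr ∨ pvCross arr r = true) :=
    Nat.find_min (p := fun r => r = pvM arr ∨ pvCross arr r = true) ⟨pvM arr, Or.inl rfl⟩ h
  rw [not_or] at hm
  exact ⟨by simpa using hm.2, hm.1⟩

lemma pvFindIter_eq (cur : List Int) : ∀ (fuel : Nat) (iter : Int) (target : Nat),
    (target : Int) ≤ iter → iter < (cur.length : Int) → (iter - target).toNat ≤ fuel →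
    pvEven (cur.getD target 0) = true →
    (∀ k : Nat, target < k → (k : Int) ≤ iter → pvEven (cur.getD k 0) = false) →
    pvFindIter cur fuel iter = (target : Int) := by
  intro fuel
  induction fuel with
  | zero =>
    intro iter target h1 _ h3 _ _
    have : iter = (target : Int) := by omega
    simp [pvFindIter, this]
  | succ f ih =>
    intro iter target h1 h2 h3 h4 h5
    rcases eq_or_lt_of_le h1 with he | hlt
    · rw [pvFindIter, ← he]
      simp only [PySem.List.pyGetD_natCast]
      rw [h4]
      simp
    · have hk : ((iter.toNat : Int)) = iter := by omega
      have hval : PySem.List.pyGetD cur iter 0 = cur.getD iter.toNat 0 := by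
        calc PySem.List.pyGetD cur iter 0 = PySem.List.pyGetD cur (↑iter.toNat) 0 := by rw [hk]
        _ = cur.getD iter.toNat 0 := PySem.List.pyGetD_natCast ..
      have hodd : pvEven (cur.getD iter.toNat 0) = false := by
        apply h5 <;> omega
      rw [pvFindIter, hval, hodd]
      rw [if_pos rfl]
      exact ih (iter - 1) target (by omega) (by omega) (by omega) h4
        (fun k hk1 hk2 => h5 k hk1 (by omega))

lemma pvInv_step {arr : List Int} {i : Nat} (hi : i < arr.length) {st : List Int × Int}
    (h : pvInv arr i st) : pvInv arr (i+1) (pvLoopBody st (i : Int)) := by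
  obtain ⟨hlen, hval, hiter⟩ := h
  by_cases hp : pvP arr i = true
  case neg =>
    have hpf : pvP arr i = false := by simpa using hp
    have hr1 : pvRank arr (i+1) = pvRank arr i := by rw [pvRank_succ, hpf]; simp
    have hsame : pvInv arr (i+1) st := ⟨hlen, by rw [hr1]; exact hval, by rw [hr1]; exact hiter⟩
    simp only [pvLoopBody]
    split
    · exact hsame
    · have hcur : PySem.List.pyGetD st.1 (i : Int) 0 = st.1.getD i 0 :=
        PySem.List.pyGetD_natCast ..
      have hexp : st.1.getD i 0 = arr.getD i 0 := by
        rw [hval i hi, pvExp, if_neg]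
        intro hc
        rw [hpf] at hc
        simp at hc
      have htest : pvEven (PySem.List.pyGetD st.1 (i : Int) 0) = false := by
        rw [hcur, hexp]
        exact hpf
      rw [if_neg (by rw [htest]; simp)]
      exact hsame
  case pos =>
    have hrm : pvRank arr i < pvM arr := pvRank_lt_m hi hp
    have hix : pvIx arr (pvRank arr i) = i := pvIx_rank hi hp
    have hr1 : pvRank arr (i+1) = pvRank arr i + 1 := by rw [pvRank_succ, hp]; simp
    rcases Nat.lt_or_ge (pvRank arr i) (pvT arr) with hTr | hTr
    case inr =>
      -- FROZEN: pvT ≤ rank i; the pointers have crossed, nothing happens any more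
      have hTm : pvT arr < pvM arr := by omega
      have hcross := pvCross_pvT hTm
      have hmin : min (pvRank arr i) (pvT arr) = pvT arr := by omega
      have hmin1 : min (pvRank arr i + 1) (pvT arr) = pvT arr := by omega
      have hguard : st.2 ≤ (i : Int) := by
        rw [hiter, hmin, pvIterF]
        by_cases hT0 : pvT arr = 0
        · rw [if_pos hT0]
          rw [pvCross, if_pos hT0] at hcross
          have h1 : arr.length ≤ pvIx arr 0 + 1 := by simpa using hcross
          have h2 : pvIx arr 0 ≤ pvIx arr (pvRank arr i) := pvIx_mono hrm (by omega)
          omega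
        · rw [if_neg hT0]
          rw [pvCross, if_neg hT0] at hcross
          have h1 : pvIx arr (pvM arr - pvT arr) ≤ pvIx arr (pvT arr) + 1 := by simpa using hcross
          have h2 : pvIx arr (pvT arr) ≤ pvIx arr (pvRank arr i) := pvIx_mono hrm (by omega)
          omega
      simp only [pvLoopBody]
      rw [if_pos hguard]
      refine ⟨hlen, ?_, ?_⟩
      · intro j hj
        rw [hr1, hmin1, hval j hj, hmin]
      · rw [hr1, hmin1, ← hmin]
        exact hiter
    case inl =>
      -- ACTIVE: rank i < pvT; a swap is performed
      have hcrossF : pvCross arr (pvRank arr i) = false := (pvCross_false_of_lt hTr).1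
      have hmin : min (pvRank arr i) (pvT arr) = pvRank arr i := by omega
      have hmin1 : min (pvRank arr i + 1) (pvT arr) = pvRank arr i + 1 := by omega
      have hK1 : pvRank arr i < pvM arr - pvRank arr i := by
        by_cases hr0 : pvRank arr i = 0
        · omega
        · rw [pvCross, if_neg hr0] at hcrossF
          have h1 : ¬ (pvIx arr (pvM arr - pvRank arr i) ≤ pvIx arr (pvRank arr i) + 1) := by
            simpa using hcrossF
          by_contra hc
          have h2 : pvIx arr (pvM arr - pvRank arr i) ≤ pvIx arr (pvRank arr i) :=
            pvIx_mono hrm (by omega)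
          omega
      have hguard : ¬ (st.2 ≤ (i : Int)) := by
        rw [hiter, hmin, pvIterF]
        by_cases hr0 : pvRank arr i = 0
        · rw [if_pos hr0]
          rw [pvCross, if_pos hr0] at hcrossF
          have h1 : ¬ (arr.length ≤ pvIx arr 0 + 1) := by simpa using hcrossF
          rw [hr0] at hix
          omega
        · rw [if_neg hr0]
          rw [pvCross, if_neg hr0] at hcrossF
          have h1 : ¬ (pvIx arr (pvM arr - pvRank arr i) ≤ pvIx arr (pvRank arr i) + 1) := by
            simpa using hcrossF
          omega
      have hexp_i : st.1.getD i 0 = arr.getD i 0 := by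
        rw [hval i hi, pvExp, if_neg]
        intro hc
        omega
      have htest : pvEven (PySem.List.pyGetD st.1 (i : Int) 0) = true := by
        rw [PySem.List.pyGetD_natCast, hexp_i]
        exact hp
      -- the even element found by the inner while loop
      have hσm : pvM arr - 1 - pvRank arr i < pvM arr := by omega
      have hσ1 : pvM arr - 1 - pvRank arr i + 1 = pvM arr - pvRank arr i := by omega
      have hσr : pvRank arr i ≤ pvM arr - 1 - pvRank arr i := by omega
      have hσlt : pvIx arr (pvM arr - 1 - pvRank arr i) < arr.length := pvIx_lt_length hσm
      have hρσ : pvRank arr (pvIx arr (pvM arr - 1 - pvRank arr i)) = pvM arr - 1 - pvRank arr i :=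
        pvRank_pvIx hσm
      have hexp_σ : st.1.getD (pvIx arr (pvM arr - 1 - pvRank arr i)) 0
          = arr.getD (pvIx arr (pvM arr - 1 - pvRank arr i)) 0 := by
        rw [hval _ hσlt, pvExp, if_neg]
        intro hc
        rw [hρσ] at hc
        omega
      have hoddbetween : ∀ k : Nat, pvIx arr (pvM arr - 1 - pvRank arr i) < k →
          (k : Int) ≤ st.2 → pvEven (st.1.getD k 0) = false := by
        intro k hk1 hk2
        rw [hiter, hmin, pvIterF] at hk2
        have hkn : k < arr.length := by
          by_cases hr0 : pvRank arr i = 0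
          · rw [if_pos hr0] at hk2; omega
          · rw [if_neg hr0] at hk2
            have := pvIx_lt_length (show pvM arr - pvRank arr i < pvM arr by omega)
            omega
        have hkodd : pvP arr k = false := by
          by_cases hr0 : pvRank arr i = 0
          · rw [if_pos hr0] at hk2
            refine pvNotP_gt_last hkn (by omega) ?_
            have : pvM arr - 1 - pvRank arr i = pvM arr - 1 := by omega
            rwa [this] at hk1
          · rw [if_neg hr0] at hk2
            refine pvNotP_between (σ := pvM arr - 1 - pvRank arr i) (by omega) hk1 ?_
            rw [hσ1]
            omega
        rw [hval k hkn, pvExp, if_neg]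
        · exact hkodd
        · intro hc
          rw [hkodd] at hc
          simp at hc
      have hfind : pvFindIter st.1 st.1.length st.2
          = ((pvIx arr (pvM arr - 1 - pvRank arr i)) : Int) := by
        apply pvFindIter_eq
        · -- target ≤ iter
          rw [hiter, hmin, pvIterF]
          by_cases hr0 : pvRank arr i = 0
          · rw [if_pos hr0]
            have : pvM arr - 1 - pvRank arr i < pvM arr := hσm
            have := hσlt
            omega
          · rw [if_neg hr0]
            have : pvIx arr (pvM arr - 1 - pvRank arr i) < pvIx arr (pvM arr - pvRank arr i) := by
              apply pvIx_lt_pvIx (by omega) (by omega)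
            omega
        · -- iter < length
          rw [hiter, hmin, pvIterF, hlen]
          by_cases hr0 : pvRank arr i = 0
          · rw [if_pos hr0]; omega
          · rw [if_neg hr0]
            have := pvIx_lt_length (show pvM arr - pvRank arr i < pvM arr by omega)
            omega
        · -- fuel
          rw [hiter, hmin, pvIterF, hlen]
          by_cases hr0 : pvRank arr i = 0
          · rw [if_pos hr0]; omega
          · rw [if_neg hr0]
            have := pvIx_lt_length (show pvM arr - pvRank arr i < pvM arr by omega)
            omega
        · -- target is even
          rw [hexp_σ]
          exact pvP_pvIx hσm
        · exact hoddbetween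
      simp only [pvLoopBody]
      rw [if_neg hguard, if_pos htest, hfind]
      rw [PySem.List.pyGetD_natCast, PySem.List.pyGetD_natCast,
        PySem.List.pySetD_natCast, PySem.List.pySetD_natCast]
      refine ⟨by simpa using hlen, ?_, ?_⟩
      · intro j hj
        have hjlen : j < (st.1.set i (st.1.getD (pvIx arr (pvM arr - 1 - pvRank arr i)) 0)).length := by
          simpa [hlen] using hj
        rw [getD_set _ _ _ _ hjlen, getD_set _ _ _ _ (by simpa [hlen] using hj)]
        rw [hr1, hmin1]
        by_cases hjσ : pvIx arr (pvM arr - 1 - pvRank arr i) = j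
        · rw [if_pos hjσ, hexp_i, pvExp, if_pos]
          · have hmσ : pvM arr - 1 - (pvRank arr j) = pvRank arr i := by
              rw [← hjσ, hρσ]; omega
            rw [hmσ, hix]
          · constructor
            · rw [← hjσ]; exact pvP_pvIx hσm
            · rw [← hjσ, hρσ]; omega
        · rw [if_neg hjσ]
          by_cases hji : i = j
          · rw [if_pos hji, hexp_σ, pvExp, if_pos]
            · rw [← hji]
            · rw [← hji]
              exact ⟨hp, Or.inl (by omega)⟩
          · rw [if_neg hji, hval j hj, hmin]
            -- untouched entries: the two conditions agree
            rw [pvExp, pvExp]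
            by_cases hpj : pvP arr j = true
            · have hjm : pvRank arr j < pvM arr := pvRank_lt_m hj hpj
              have hj_ix : pvIx arr (pvRank arr j) = j := pvIx_rank hj hpj
              have hne_r : pvRank arr j ≠ pvRank arr i := by
                intro he
                rw [he, hix] at hj_ix
                exact hji hj_ix
              have hne_σ : pvRank arr j ≠ pvM arr - 1 - pvRank arr i := by
                intro he
                rw [he] at hj_ix
                exact hjσ hj_ix
              refine if_congr ⟨fun hc => ⟨hc.1, by omega⟩, fun hc => ⟨hc.1, by omega⟩⟩ rfl rfl
            · have hpjf : pvP arr j = false := by simpa using hpj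
              rw [if_neg (by intro hc; rw [hpjf] at hc; simp at hc),
                if_neg (by intro hc; rw [hpjf] at hc; simp at hc)]
      · rw [hr1, hmin1, pvIterF, if_neg (by omega)]
        have : pvM arr - (pvRank arr i + 1) = pvM arr - 1 - pvRank arr i := by omega
        rw [this]

lemma pvInv_fold (arr : List Int) : ∀ i, i ≤ arr.length →
    pvInv arr i ((List.range i).foldl (fun st (k : Nat) => pvLoopBody st (k : Int))
      (arr, (arr.length : Int) - 1)) := by
  intro i
  induction i with
  | zero =>
    intro _
    have hmin : min (pvRank arr 0) (pvT arr) = 0 := by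
      have : pvRank arr 0 = 0 := rfl
      omega
    rw [List.range_zero]
    refine ⟨rfl, ?_, ?_⟩
    · intro j hj
      simp only [List.foldl_nil, hmin]
      rw [pvExp]
      split
      · next hc =>
        have := pvRank_lt_m hj hc.1
        omega
      · rfl
    · simp [hmin, pvIterF]
  | succ i ih =>
    intro hsucc
    rw [List.range_succ, List.foldl_append]
    exact pvInv_step (by omega) (ih (by omega))

lemma pvFill_length (l : List Int) : ∀ es : List Int, (pvFill l es).length = l.length := by
  induction l with
  | nil => intro es; rfl
  | cons x xs ih =>
    intro es
    cases es with
    | nil =>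
      simp only [pvFill]
      split
      · simp [ih]
      · simp [ih]
    | cons e es' =>
      simp only [pvFill]
      split
      · simp [ih]
      · simp [ih]

lemma pvFill_getD (l : List Int) : ∀ (es : List Int) (j : Nat), j < l.length →
    l.countP (fun x => PySem.Int.mod x 2 == 0) ≤ es.length →
    (pvFill l es).getD j 0 =
      if pvP l j = true then es.getD ((l.take j).countP (fun x => PySem.Int.mod x 2 == 0)) 0
      else l.getD j 0 := by
  induction l with
  | nil => intro es j hj; simp at hj
  | cons x xs ih =>
    intro es j hj hcnt
    rw [List.countP_cons] at hcnt
    have hjx : j < xs.length + 1 := by simpa using hj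
    by_cases hx : (PySem.Int.mod x 2 == 0) = true
    · rw [if_pos hx] at hcnt
      have hes : ∃ e es', es = e :: es' := by
        cases es with
        | nil => simp only [List.length_nil] at hcnt; omega
        | cons e es' => exact ⟨e, es', rfl⟩
      obtain ⟨e, es', rfl⟩ := hes
      simp only [List.length_cons] at hcnt
      have hfill : pvFill (x :: xs) (e :: es') = e :: pvFill xs es' := by
        simp only [pvFill]
        rw [if_pos hx]
      rw [hfill]
      cases j with
      | zero =>
        have hc0 : pvP (x :: xs) 0 = true := by
          rw [pvP, List.getD_cons_zero, pvEven_eq_beq]; exact hx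
        rw [if_pos hc0]
        rfl
      | succ j =>
        simp only [List.getD_cons_succ]
        rw [ih es' j (by omega) (by omega)]
        have hpp : pvP (x :: xs) (j+1) = pvP xs j := by
          rw [pvP, List.getD_cons_succ]; rfl
        have htk : ((x :: xs).take (j+1)).countP (fun x => PySem.Int.mod x 2 == 0)
            = (xs.take j).countP (fun x => PySem.Int.mod x 2 == 0) + 1 := by
          rw [List.take_succ_cons, List.countP_cons, if_pos hx]
        rw [hpp, htk]
        by_cases hpj : pvP xs j = true
        · rw [if_pos hpj, if_pos hpj, List.getD_cons_succ]
        · rw [if_neg hpj, if_neg hpj]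
    · have hxf : (PySem.Int.mod x 2 == 0) = false := by simpa using hx
      rw [if_neg hx] at hcnt
      have hfill : pvFill (x :: xs) es = x :: pvFill xs es := by
        simp only [pvFill]
        rw [if_neg (by rw [hxf]; exact Bool.false_ne_true)]
      rw [hfill]
      cases j with
      | zero =>
        have hc0 : pvP (x :: xs) 0 = false := by
          rw [pvP, List.getD_cons_zero, pvEven_eq_beq]; exact hxf
        rw [if_neg (by rw [hc0]; exact Bool.false_ne_true), List.getD_cons_zero, List.getD_cons_zero]
      | succ j =>
        simp only [List.getD_cons_succ]
        rw [ih es j (by omega) (by omega)]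
        have hpp : pvP (x :: xs) (j+1) = pvP xs j := by
          rw [pvP, List.getD_cons_succ]; rfl
        have htk : ((x :: xs).take (j+1)).countP (fun x => PySem.Int.mod x 2 == 0)
            = (xs.take j).countP (fun x => PySem.Int.mod x 2 == 0) := by
          rw [List.take_succ_cons, List.countP_cons,
            if_neg (by rw [hxf]; exact Bool.false_ne_true)]
          rfl
        rw [hpp, htk]

lemma pvTake_countP (arr : List Int) : ∀ j, j ≤ arr.length →
    (arr.take j).countP (fun x => PySem.Int.mod x 2 == 0) = pvRank arr j := by
  intro j
  induction j with
  | zero => intro _; rfl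
  | succ j ih =>
    intro hj
    have hjn : j < arr.length := by omega
    rw [List.take_add_one, List.countP_append, ih (by omega), pvRank_succ]
    rw [List.getElem?_eq_getElem hjn]
    have : pvP arr j = (PySem.Int.mod (arr[j]) 2 == 0) := by
      rw [pvP, pvEven_eq_beq, List.getD_eq_getElem arr 0 hjn]
    rw [this]
    rw [Option.toList_some, List.countP_cons, List.countP_nil]
    by_cases hx : (PySem.Int.mod (arr[j]) 2 == 0) = true
    · omega
    · omega

lemma pvFilter_eq (arr : List Int) :
    arr.filter (fun x => PySem.Int.mod x 2 == 0) = (pvIdxs arr).map (fun k => arr.getD k 0) := by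
  have hmr : (List.range arr.length).map (fun k => arr.getD k 0) = arr := by
    apply List.ext_getElem (by simp)
    intro i h1 h2
    rw [List.getElem_map, List.getElem_range]
    exact List.getD_eq_getElem arr 0 h2
  conv_lhs => rw [← hmr]
  rw [List.filter_map]
  congr 1
  rw [pvIdxs]
  apply List.filter_congr
  intro a _
  simp only [Function.comp_apply, pvP, pvEven_eq_beq]

lemma pvFilter_length (arr : List Int) :
    (arr.filter (fun x => PySem.Int.mod x 2 == 0)).length = pvM arr := by
  rw [pvFilter_eq, List.length_map]
  rfl

lemma pvCountP_eq (arr : List Int) :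
    arr.countP (fun x => PySem.Int.mod x 2 == 0) = pvM arr := by
  rw [List.countP_eq_length_filter, pvFilter_length]

lemma pvGetD_reverse (l : List Int) {ρ : Nat} (h : ρ < l.length) :
    l.reverse.getD ρ 0 = l.getD (l.length - 1 - ρ) 0 := by
  rw [List.getD_eq_getElem _ 0 (by simpa using h), List.getD_eq_getElem _ 0 (by omega),
    List.getElem_reverse]

lemma pvGetD_map_idx (arr : List Int) (k : Nat) (h : k < pvM arr) :
    ((pvIdxs arr).map (fun j => arr.getD j 0)).getD k 0 = arr.getD (pvIx arr k) 0 := by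
  rw [List.getD_eq_getElem _ 0 (by simpa using h), List.getElem_map, pvIx,
    List.getD_eq_getElem _ 0 h]
  rfl

lemma pvRev_getD (arr : List Int) {ρ : Nat} (hρ : ρ < pvM arr) :
    ((arr.filter (fun x => PySem.Int.mod x 2 == 0)).reverse).getD ρ 0
      = arr.getD (pvIx arr (pvM arr - 1 - ρ)) 0 := by
  have hlen : (arr.filter (fun x => PySem.Int.mod x 2 == 0)).length = pvM arr :=
    pvFilter_length arr
  rw [pvGetD_reverse _ (by rw [hlen]; omega), hlen, pvFilter_eq]
  exact pvGetD_map_idx arr _ (by omega)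

lemma pv_main (arr : List Int) : reverse_even_elements arr = reverse_even_elements_alt arr := by
  have hfold := pvInv_fold arr arr.length le_rfl
  obtain ⟨hlenA, hvalA, _⟩ := hfold
  have hA : reverse_even_elements arr
      = ((List.range arr.length).foldl (fun st (k : Nat) => pvLoopBody st (k : Int))
          (arr, (arr.length : Int) - 1)).1 := by
    rw [reverse_even_elements]
    have hpr : PySem.List.pyRange 0 (arr.length : Int) 1
        = (List.range arr.length).map (fun (k : Nat) => (k : Int)) := by
      rw [PySem.List.pyRange_one]
      simp
    rw [hpr, List.foldl_map]
  have hBlen : (reverse_even_elements_alt arr).length = arr.length := by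
    rw [reverse_even_elements_alt, pvFill_length]
  have hcnt : arr.countP (fun x => PySem.Int.mod x 2 == 0)
      ≤ ((arr.filter (fun x => PySem.Int.mod x 2 == 0)).reverse).length := by
    rw [List.length_reverse, pvFilter_length, pvCountP_eq]
  apply List.ext_getElem (by rw [hBlen, hA, hlenA])
  intro k h1 h2
  have hkn : k < arr.length := by rwa [hBlen] at h2
  have hAk : (reverse_even_elements arr)[k]'h1
      = pvExp arr (min (pvM arr) (pvT arr)) k := by
    have := hvalA k hkn
    rw [pvRank_length] at this
    rw [← List.getD_eq_getElem _ 0 h1]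
    have hAeq : (reverse_even_elements arr).getD k 0
        = ((List.range arr.length).foldl (fun st (k : Nat) => pvLoopBody st (k : Int))
            (arr, (arr.length : Int) - 1)).1.getD k 0 := by rw [hA]
    rw [hAeq, this]
  have hBk : (reverse_even_elements_alt arr)[k]'h2
      = if pvP arr k = true
        then ((arr.filter (fun x => PySem.Int.mod x 2 == 0)).reverse).getD (pvRank arr k) 0
        else arr.getD k 0 := by
    rw [← List.getD_eq_getElem _ 0 h2, reverse_even_elements_alt,
      pvFill_getD arr _ k hkn hcnt, pvTake_countP arr k (by omega)]
  rw [hAk, hBk]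
  by_cases hpk : pvP arr k = true
  · have hρm : pvRank arr k < pvM arr := pvRank_lt_m hkn hpk
    have hkix : pvIx arr (pvRank arr k) = k := pvIx_rank hkn hpk
    rw [if_pos hpk, pvRev_getD arr hρm, pvExp]
    by_cases hcnd : pvRank arr k < min (pvM arr) (pvT arr)
        ∨ pvM arr - min (pvM arr) (pvT arr) ≤ pvRank arr k
    · rw [if_pos ⟨hpk, hcnd⟩]
    · rw [if_neg (by intro hc; exact hcnd hc.2)]
      -- the untouched middle element: it is its own mirror image
      have hTm : pvT arr < pvM arr := by
        by_contra hTc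
        have : min (pvM arr) (pvT arr) = pvM arr := by omega
        rw [this] at hcnd
        omega
      have htst : min (pvM arr) (pvT arr) = pvT arr := by omega
      rw [htst] at hcnd
      have hcross := pvCross_pvT hTm
      have hmid : pvM arr - 1 - pvRank arr k = pvRank arr k := by
        by_cases hT0 : pvT arr = 0
        · rw [pvCross, if_pos hT0] at hcross
          have h1 : arr.length ≤ pvIx arr 0 + 1 := by simpa using hcross
          have h2 : pvIx arr (pvM arr - 1) < arr.length := pvIx_lt_length (by omega)
          have h3 : pvIx arr 0 ≤ pvIx arr (pvM arr - 1) := pvIx_mono (by omega) (by omega)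
          have hm1 : pvM arr = 1 := by
            by_contra hmc
            have : pvIx arr 0 < pvIx arr (pvM arr - 1) :=
              pvIx_lt_pvIx (by omega) (by omega)
            omega
          omega
        · rw [pvCross, if_neg hT0] at hcross
          have h1 : pvIx arr (pvM arr - pvT arr) ≤ pvIx arr (pvT arr) + 1 := by
            simpa using hcross
          have hTmT : pvT arr < pvM arr - pvT arr := by omega
          have h2 : pvIx arr (pvT arr) < pvIx arr (pvM arr - pvT arr) :=
            pvIx_lt_pvIx (by omega) hTmT
          have hMT : pvM arr - pvT arr = pvT arr + 1 := by
            by_contra hmc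
            have hplus : pvT arr + 1 < pvM arr - pvT arr := by omega
            have s1 : pvIx arr (pvT arr) < pvIx arr (pvT arr + 1) :=
              pvIx_lt_pvIx (by omega) (by omega)
            have s2 : pvIx arr (pvT arr + 1) < pvIx arr (pvM arr - pvT arr) :=
              pvIx_lt_pvIx (by omega) hplus
            omega
          omega
      rw [hmid, hkix]

  · rw [if_neg hpk, pvExp, if_neg (by intro hc; exact hpk hc.1)]

theorem reverse_even_elements_spec : Claim_equal_reverse_even_elements := by
  intro arr _
  rw [Spec_reverse_even_elements]
  exact pv_main arr
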